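-- pv_equiv track=rewrite | github.com/GyuCheol/happy_algorithm | 20_05_May/0518_gan_generator/lee_60059.py | check_map
-- ===== SOURCE A (Python) =====
-- def check_map(key, lock, s_x, s_y):
--     lock_len = len(lock)
--     key_len = len(key)
--     count = 0
--
--     for y in range(key_len):
--         for x in range(key_len):
--             d_x = s_x + x
--             d_y = s_y + y
--
--             if 0 <= d_x < lock_len and 0 <= d_y < lock_len:
--                 if key[y][x] == 1 and lock[d_y][d_x] == 0:
--                     count += 1
--                 elif key[y][x] == 1 and lock[d_y][d_x] == 1:
--                     return -1
--
--     return count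
-- ===== SOURCE B (Python) =====
-- def check_map(key, lock, s_x, s_y):
--     lock_len = len(lock)
--     # Gather the in-window target coordinates of the key's 1-cells, then test for
--     # conflicts in one pass and count fits in another.
--     cells = [(s_y + y, s_x + x)
--              for y in range(len(key)) for x in range(len(key))
--              if 0 <= s_x + x < lock_len and 0 <= s_y + y < lock_len
--              and key[y][x] == 1]
--     if any(lock[dy][dx] == 1 for dy, dx in cells):
--         return -1
--     return sum(1 for dy, dx in cells if lock[dy][dx] == 0)
-- ===== Notes on version B (the rewrite author's own statement) =====
-- stated objective: alternative
-- what changed: A's single merged nested scan with an early return is decomposed into building the list of in-window target coordinates of the key's 1-cells, then one any() pass for conflicts and one counting pass for fits.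
-- outside the precondition, e.g. on check_map([[1, 0], [1]], [[1, 1], [1, 1]], 0, 0): A returns -1, B raises IndexError
import Mathlib
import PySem

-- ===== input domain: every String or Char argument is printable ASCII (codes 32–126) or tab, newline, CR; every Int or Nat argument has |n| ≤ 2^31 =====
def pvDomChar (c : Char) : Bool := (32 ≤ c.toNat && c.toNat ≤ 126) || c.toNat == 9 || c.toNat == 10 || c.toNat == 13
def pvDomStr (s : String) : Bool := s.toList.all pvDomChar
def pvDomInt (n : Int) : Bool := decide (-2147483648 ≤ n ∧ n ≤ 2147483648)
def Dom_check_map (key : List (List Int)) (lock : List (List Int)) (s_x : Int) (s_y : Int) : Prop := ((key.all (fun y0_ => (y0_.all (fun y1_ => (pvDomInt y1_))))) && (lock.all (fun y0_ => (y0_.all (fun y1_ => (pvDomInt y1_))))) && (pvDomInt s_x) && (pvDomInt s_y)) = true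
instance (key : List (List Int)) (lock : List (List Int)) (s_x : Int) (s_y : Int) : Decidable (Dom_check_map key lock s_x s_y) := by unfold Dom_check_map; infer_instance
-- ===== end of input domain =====

-- B replaces A's merged scan (count-and-conflict with an early return inside the nested
-- loops) by a decomposition: first gather the in-window target coordinates of the key's
-- 1-cells, then one pass detecting a conflict and one pass counting fits ('alternative').

-- ===== PORT A =====
-- One body step of A's nested loop, on state Except (Option Int) Int:
-- .ok count = loop running, .error (some v) = Python already executed 'return v',
-- .error none = Python raised IndexError (ragged row; excluded by Pre_check_map).
def pvAStep (key : List (List Int)) (lock : List (List Int)) (s_x : Int) (s_y : Int) (y : Int)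
    (st : Except (Option Int) Int) (x : Int) : Except (Option Int) Int :=
  match st with
  | .error e => .error e
  | .ok count =>
    if 0 ≤ s_x + x ∧ s_x + x < (lock.length : Int) ∧ 0 ≤ s_y + y ∧ s_y + y < (lock.length : Int) then
      -- Python short-circuits: lock[d_y][d_x] is read only when key[y][x] == 1
      match PySem.List.pyGet? (PySem.List.pyGetD key y []) x with
      | none => Except.error none
      | some kv =>
        if kv = 1 then
          match PySem.List.pyGet? (PySem.List.pyGetD lock (s_y + y) []) (s_x + x) with
          | none => Except.error none
          | some lv =>
            if lv = 0 then Except.ok (count + 1)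
            else if lv = 1 then Except.error (some (-1))
            else Except.ok count
        else Except.ok count
    else Except.ok count

def check_map (key : List (List Int)) (lock : List (List Int)) (s_x : Int) (s_y : Int) : Int :=
  match (PySem.List.pyRange 0 (key.length : Int) 1).foldl
      (fun st y => (PySem.List.pyRange 0 (key.length : Int) 1).foldl (pvAStep key lock s_x s_y y) st)
      (Except.ok 0) with
  | .ok c => c
  | .error (some v) => v
  | .error none => 0  -- unreachable under Pre_check_map (Python raises IndexError there)

-- ===== PORT B =====
-- B's first pass: the in-window target coordinates of the key's 1-cells
def pvCells (key : List (List Int)) (lock : List (List Int)) (s_x : Int) (s_y : Int) : List (Int × Int) :=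
  (PySem.List.pyRange 0 (key.length : Int) 1).flatMap (fun y =>
    (PySem.List.pyRange 0 (key.length : Int) 1).filterMap (fun x =>
      if (0 ≤ s_x + x ∧ s_x + x < (lock.length : Int) ∧ 0 ≤ s_y + y ∧ s_y + y < (lock.length : Int)) ∧
          PySem.List.pyGetD (PySem.List.pyGetD key y []) x 0 = 1
      then some (s_y + y, s_x + x) else none))

def check_map_alt (key : List (List Int)) (lock : List (List Int)) (s_x : Int) (s_y : Int) : Int :=
  if (pvCells key lock s_x s_y).any (fun c => PySem.List.pyGetD (PySem.List.pyGetD lock c.1 []) c.2 0 == 1)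
  then -1
  else (pvCells key lock s_x s_y).foldl
    (fun acc c => if PySem.List.pyGetD (PySem.List.pyGetD lock c.1 []) c.2 0 = 0 then acc + 1 else acc) 0

-- ===== PRECONDITION & SPEC =====
-- Pre_ excludes ragged grids on which Python raises IndexError: a key row too short for an
-- in-window cell, or (when that key cell is 1) a lock row too short for its target; on the
-- part of that region where A still returns (-1 from a conflict found earlier in scan
-- order) B itself raises, so those inputs are excluded rather than differenced.
def Pre_check_map (key : List (List Int)) (lock : List (List Int)) (s_x : Int) (s_y : Int) : Prop :=
  ∀ y < key.length, ∀ x < key.length,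
    (0 ≤ s_x + (x : Int) ∧ s_x + (x : Int) < (lock.length : Int) ∧
     0 ≤ s_y + (y : Int) ∧ s_y + (y : Int) < (lock.length : Int)) →
    x < (key.getD y []).length ∧
    ((key.getD y []).getD x 0 = 1 →
      (s_x + (x : Int)).toNat < (lock.getD (s_y + (y : Int)).toNat []).length)
instance (key : List (List Int)) (lock : List (List Int)) (s_x : Int) (s_y : Int) : Decidable (Pre_check_map key lock s_x s_y) := by unfold Pre_check_map; infer_instance

def pvWitness_check_map : List (List Int) × List (List Int) × Int × Int :=
  ([[1, 0], [0, 1]], [[0, 1], [1, 0]], 0, 0)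

def Spec_check_map (key : List (List Int)) (lock : List (List Int)) (s_x : Int) (s_y : Int) (out : Int) : Prop := out = check_map_alt key lock s_x s_y
instance (key : List (List Int)) (lock : List (List Int)) (s_x : Int) (s_y : Int) (out : Int) : Decidable (Spec_check_map key lock s_x s_y out) := by unfold Spec_check_map; infer_instance

-- ===== CLAIM (what is proved, stated in full; the proofs are below) =====
def Claim_equal_check_map : Prop := ∀ (key : List (List Int)) (lock : List (List Int)) (s_x : Int) (s_y : Int), Dom_check_map key lock s_x s_y → Pre_check_map key lock s_x s_y → Spec_check_map key lock s_x s_y (check_map key lock s_x s_y)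

-- ===== LEMMAS AND PROOFS =====

-- value read from the lock at a target coordinate (B's read)
def pvLv (lock : List (List Int)) (c : Int × Int) : Int :=
  PySem.List.pyGetD (PySem.List.pyGetD lock c.1 []) c.2 0

-- value read from the key at (y, x) (B's read)
def pvKv (key : List (List Int)) (y x : Int) : Int :=
  PySem.List.pyGetD (PySem.List.pyGetD key y []) x 0

-- B's second pass: count of gathered cells sitting on a lock 0
def pvCnt (lock : List (List Int)) (l : List (Int × Int)) : Int :=
  l.foldl (fun acc c => if PySem.List.pyGetD (PySem.List.pyGetD lock c.1 []) c.2 0 = 0 then acc + 1 else acc) 0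

-- B's gathered cells for one key row y, over a list of column indices
def pvRowOf (key : List (List Int)) (lock : List (List Int)) (s_x : Int) (s_y : Int) (y : Int)
    (l : List Int) : List (Int × Int) :=
  l.filterMap (fun x =>
    if (0 ≤ s_x + x ∧ s_x + x < (lock.length : Int) ∧ 0 ≤ s_y + y ∧ s_y + y < (lock.length : Int)) ∧
        PySem.List.pyGetD (PySem.List.pyGetD key y []) x 0 = 1
    then some (s_y + y, s_x + x) else none)

-- at (y, x): both of A's option reads succeed and agree with B's defaulted reads
def pvGood (key : List (List Int)) (lock : List (List Int)) (s_x : Int) (s_y : Int) (y x : Int) : Prop :=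
  (0 ≤ s_x + x ∧ s_x + x < (lock.length : Int) ∧ 0 ≤ s_y + y ∧ s_y + y < (lock.length : Int)) →
    PySem.List.pyGet? (PySem.List.pyGetD key y []) x = some (pvKv key y x) ∧
    (pvKv key y x = 1 →
      PySem.List.pyGet? (PySem.List.pyGetD lock (s_y + y) []) (s_x + x) = some (pvLv lock (s_y + y, s_x + x)))

theorem pvAStep_err (key lock : List (List Int)) (s_x s_y y : Int) (e : Option Int)
    (l : List Int) : l.foldl (pvAStep key lock s_x s_y y) (.error e) = .error e := by
  induction l with
  | nil => rfl
  | cons a l ih => simpa [pvAStep] using ih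

theorem pvFoldCnt (lock : List (List Int)) (l : List (Int × Int)) (a : Int) :
    l.foldl (fun acc c => if PySem.List.pyGetD (PySem.List.pyGetD lock c.1 []) c.2 0 = 0 then acc + 1 else acc) a
      = a + l.foldl (fun acc c => if PySem.List.pyGetD (PySem.List.pyGetD lock c.1 []) c.2 0 = 0 then acc + 1 else acc) 0 := by
  induction l generalizing a with
  | nil => simp
  | cons c l ih =>
    simp only [List.foldl_cons]
    rw [ih]
    conv_rhs => rw [ih]
    split_ifs <;> omega

theorem pvCnt_acc (lock : List (List Int)) (l : List (Int × Int)) (a : Int) :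
    l.foldl (fun acc c => if PySem.List.pyGetD (PySem.List.pyGetD lock c.1 []) c.2 0 = 0 then acc + 1 else acc) a
      = a + pvCnt lock l := by
  unfold pvCnt; exact pvFoldCnt lock l a

theorem pvCnt_cons (lock : List (List Int)) (c : Int × Int) (l : List (Int × Int)) :
    pvCnt lock (c :: l) = (if pvLv lock c = 0 then 1 else 0) + pvCnt lock l := by
  unfold pvCnt pvLv
  simp only [List.foldl_cons]
  rw [pvCnt_acc]
  unfold pvCnt
  split_ifs <;> omega

theorem pvCnt_append (lock : List (List Int)) (l₁ l₂ : List (Int × Int)) :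
    pvCnt lock (l₁ ++ l₂) = pvCnt lock l₁ + pvCnt lock l₂ := by
  unfold pvCnt
  rw [List.foldl_append, pvCnt_acc]
  unfold pvCnt
  omega

-- the inner loop of A over column list l, related to B's gathered cells of that row
theorem pvInner (key lock : List (List Int)) (s_x s_y y : Int) (l : List Int) (c : Int)
    (h : ∀ x ∈ l, pvGood key lock s_x s_y y x) :
    l.foldl (pvAStep key lock s_x s_y y) (.ok c)
      = if (pvRowOf key lock s_x s_y y l).any (fun c => PySem.List.pyGetD (PySem.List.pyGetD lock c.1 []) c.2 0 == 1)
        then .error (some (-1))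
        else .ok (c + pvCnt lock (pvRowOf key lock s_x s_y y l)) := by
  induction l generalizing c with
  | nil => simp [pvRowOf, pvCnt]
  | cons x l ih =>
    have hx := h x (List.mem_cons_self ..)
    have hl : ∀ x ∈ l, pvGood key lock s_x s_y y x := fun a ha => h a (List.mem_cons_of_mem _ ha)
    by_cases hw : 0 ≤ s_x + x ∧ s_x + x < (lock.length : Int) ∧ 0 ≤ s_y + y ∧ s_y + y < (lock.length : Int)
    · obtain ⟨hk, hlk⟩ := hx hw
      by_cases hkv : pvKv key y x = 1
      · have hkv' : PySem.List.pyGetD (PySem.List.pyGetD key y []) x 0 = 1 := by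
          simpa [pvKv] using hkv
        have hlv := hlk hkv
        have hrow : pvRowOf key lock s_x s_y y (x :: l)
            = (s_y + y, s_x + x) :: pvRowOf key lock s_x s_y y l := by
          simp [pvRowOf, hw, hkv']
        by_cases h0 : pvLv lock (s_y + y, s_x + x) = 0
        · have hstep : pvAStep key lock s_x s_y y (Except.ok c) x = Except.ok (c + 1) := by
            simp [pvAStep, hw, hk, hkv, hlv, h0]
          have hcb : (PySem.List.pyGetD (PySem.List.pyGetD lock (s_y + y) []) (s_x + x) 0 == 1) = false := by
            simp only [pvLv] at h0; simp [h0]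
          rw [List.foldl_cons, hstep, ih _ hl, hrow]
          simp only [List.any_cons, hcb, Bool.false_or, pvCnt_cons, if_pos h0]
          split_ifs with h1
          · rfl
          · congr 1; omega
        · by_cases h1 : pvLv lock (s_y + y, s_x + x) = 1
          · have hstep : pvAStep key lock s_x s_y y (Except.ok c) x = Except.error (some (-1)) := by
              simp [pvAStep, hw, hk, hkv, hlv, h1]
            have hcb : (PySem.List.pyGetD (PySem.List.pyGetD lock (s_y + y) []) (s_x + x) 0 == 1) = true := by
              simp only [pvLv] at h1; simp [h1]
            rw [List.foldl_cons, hstep, pvAStep_err, hrow]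
            simp [List.any_cons, hcb]
          · have hstep : pvAStep key lock s_x s_y y (Except.ok c) x = Except.ok c := by
              simp [pvAStep, hw, hk, hkv, hlv, h0, h1]
            have hcb : (PySem.List.pyGetD (PySem.List.pyGetD lock (s_y + y) []) (s_x + x) 0 == 1) = false := by
              simp only [pvLv] at h1; simp [h1]
            rw [List.foldl_cons, hstep, ih _ hl, hrow]
            simp only [List.any_cons, hcb, Bool.false_or, pvCnt_cons, if_neg h0]
            split_ifs with h2
            · rfl
            · congr 1; omega
      · have hkv' : ¬ PySem.List.pyGetD (PySem.List.pyGetD key y []) x 0 = 1 := by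
          simpa [pvKv] using hkv
        have hrow : pvRowOf key lock s_x s_y y (x :: l) = pvRowOf key lock s_x s_y y l := by
          simp [pvRowOf, hkv']
        have hstep : pvAStep key lock s_x s_y y (Except.ok c) x = Except.ok c := by
          simp [pvAStep, hw, hk, hkv]
        rw [List.foldl_cons, hstep, hrow]
        exact ih _ hl
    · have hrow : pvRowOf key lock s_x s_y y (x :: l) = pvRowOf key lock s_x s_y y l := by
        have : ¬ ((0 ≤ s_x + x ∧ s_x + x < (lock.length : Int) ∧ 0 ≤ s_y + y ∧ s_y + y < (lock.length : Int)) ∧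
            PySem.List.pyGetD (PySem.List.pyGetD key y []) x 0 = 1) := fun hcon => hw hcon.1
        simp [pvRowOf, this]
      have hstep : pvAStep key lock s_x s_y y (Except.ok c) x = Except.ok c := by
        simp [pvAStep, hw]
      rw [List.foldl_cons, hstep, hrow]
      exact ih _ hl

theorem pvOuter_err (key lock : List (List Int)) (s_x s_y : Int) (ys : List Int) (e : Option Int) :
    ys.foldl (fun st y => (PySem.List.pyRange 0 (key.length : Int) 1).foldl (pvAStep key lock s_x s_y y) st)
      (Except.error e) = Except.error e := by
  induction ys with
  | nil => rfl
  | cons a l ih => simpa [pvAStep_err] using ih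

-- the outer loop of A over row list ys
theorem pvOuter (key lock : List (List Int)) (s_x s_y : Int) (ys : List Int) (c : Int)
    (h : ∀ y ∈ ys, ∀ x ∈ PySem.List.pyRange 0 (key.length : Int) 1, pvGood key lock s_x s_y y x) :
    ys.foldl (fun st y => (PySem.List.pyRange 0 (key.length : Int) 1).foldl (pvAStep key lock s_x s_y y) st) (.ok c)
      = if (ys.flatMap (fun y => pvRowOf key lock s_x s_y y (PySem.List.pyRange 0 (key.length : Int) 1))).any
            (fun c => PySem.List.pyGetD (PySem.List.pyGetD lock c.1 []) c.2 0 == 1)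
        then .error (some (-1))
        else .ok (c + pvCnt lock (ys.flatMap (fun y => pvRowOf key lock s_x s_y y (PySem.List.pyRange 0 (key.length : Int) 1)))) := by
  induction ys generalizing c with
  | nil => simp [pvCnt]
  | cons y ys ih =>
    have hy := h y (List.mem_cons_self ..)
    have hys : ∀ y' ∈ ys, ∀ x ∈ PySem.List.pyRange 0 (key.length : Int) 1, pvGood key lock s_x s_y y' x :=
      fun a ha => h a (List.mem_cons_of_mem _ ha)
    simp only [List.foldl_cons, List.flatMap_cons, List.any_append]
    rw [pvInner key lock s_x s_y y _ c hy]
    by_cases hc : (pvRowOf key lock s_x s_y y (PySem.List.pyRange 0 (key.length : Int) 1)).any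
        (fun c => PySem.List.pyGetD (PySem.List.pyGetD lock c.1 []) c.2 0 == 1)
    · rw [if_pos hc, pvOuter_err]
      simp [hc]
    · rw [if_neg hc, ih _ hys, pvCnt_append]
      simp only [hc, Bool.false_or]
      split_ifs with h2
      · rfl
      · congr 1; omega

theorem pvPre_good (key lock : List (List Int)) (s_x s_y : Int)
    (hpre : Pre_check_map key lock s_x s_y) :
    ∀ y ∈ PySem.List.pyRange 0 (key.length : Int) 1,
      ∀ x ∈ PySem.List.pyRange 0 (key.length : Int) 1, pvGood key lock s_x s_y y x := by
  unfold Pre_check_map at hpre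
  intro y hy x hx
  unfold pvGood
  intro hw
  rw [PySem.List.mem_pyRange_one] at hy hx
  have hylt : y.toNat < key.length := by omega
  have hxlt : x.toNat < key.length := by omega
  obtain ⟨h1, h2⟩ := hpre y.toNat hylt x.toNat hxlt (by constructor <;> [omega; (constructor <;> [omega; (constructor <;> omega)])])
  rw [show ((y.toNat : Int)) = y from by omega, show ((x.toNat : Int)) = x from by omega] at h2
  have hkrow : PySem.List.pyGetD key y [] = key[y.toNat] :=
    PySem.List.pyGetD_eq_getElem key [] (by omega) (by omega)
  have hkgd : key.getD y.toNat [] = key[y.toNat] := List.getD_eq_getElem key [] hylt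
  rw [hkgd] at h1 h2
  have hxrow : x.toNat < (key[y.toNat]).length := h1
  have hkv : pvKv key y x = (key[y.toNat])[x.toNat] := by
    unfold pvKv
    rw [hkrow, PySem.List.pyGetD_eq_getElem _ 0 (by omega) (by omega)]
  constructor
  · rw [hkrow, PySem.List.pyGet?_eq_some_getElem _ (by omega) (by omega), hkv]
  · intro hone
    have h2' := h2 (by rw [List.getD_eq_getElem _ 0 hxrow, ← hkv]; exact hone)
    have hlrow : PySem.List.pyGetD lock (s_y + y) [] = lock[(s_y + y).toNat] :=
      PySem.List.pyGetD_eq_getElem lock [] (by omega) (by omega)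
    have hlgd : lock.getD (s_y + y).toNat [] = lock[(s_y + y).toNat] :=
      List.getD_eq_getElem lock [] (by omega)
    rw [hlgd] at h2'
    rw [hlrow, PySem.List.pyGet?_eq_some_getElem _ (by omega) (by omega)]
    unfold pvLv
    simp only [hlrow]
    rw [PySem.List.pyGetD_eq_getElem _ 0 (by omega) (by omega)]

theorem pvCells_eq (key lock : List (List Int)) (s_x s_y : Int) :
    (PySem.List.pyRange 0 (key.length : Int) 1).flatMap
        (fun y => pvRowOf key lock s_x s_y y (PySem.List.pyRange 0 (key.length : Int) 1))
      = pvCells key lock s_x s_y := by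
  unfold pvCells pvRowOf
  rfl

-- ===== VERDICT (by name: the statement is the Claim_ definition above) =====
theorem check_map_spec : Claim_equal_check_map := by
  intro key lock s_x s_y _ hpre
  unfold Spec_check_map check_map check_map_alt
  rw [pvOuter key lock s_x s_y _ 0 (pvPre_good key lock s_x s_y hpre), pvCells_eq]
  by_cases hc : (pvCells key lock s_x s_y).any
      (fun c => PySem.List.pyGetD (PySem.List.pyGetD lock c.1 []) c.2 0 == 1)
  · rw [if_pos hc, if_pos hc]
  · rw [if_neg hc, if_neg hc]
    show (0 : Int) + pvCnt lock (pvCells key lock s_x s_y) = _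
    rw [zero_add]
    rfl
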